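-- pv_equiv track=rewrite | github.com/97cool-vikas/Interviewbit | Python3/Math/Primers/MATH_BUG02.py | squareSum
-- ===== SOURCE A (Python) =====
-- def squareSum(A):
--     ans = []
--     a = 0
--     while a * a < A:
--         b = 0
--         while b * b < A  :
--             if a * a + b * b == A and a <= b:
--                 newEntry = [a, b]
--                 ans.append(newEntry)
--             b += 1
--         a += 1
--     return ans
-- ===== SOURCE B (Python) =====
-- def squareSum(A):
--     # Two-pointer sweep over 0 <= a <= b with b*b < A (the same strict bound A's loops use):
--     # climb b to the largest value with b*b < A, then move a up / b down in one pass.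
--     ans = []
--     b = 0
--     while b * b < A:
--         b += 1
--     b -= 1
--     a = 0
--     while a <= b:
--         s = a * a + b * b
--         if s == A:
--             ans.append([a, b])
--             a += 1
--             b -= 1
--         elif s < A:
--             a += 1
--         else:
--             b -= 1
--     return ans
-- ===== Notes on version B (the rewrite author's own statement) =====
-- stated objective: faster
-- what changed: Replaces the quadratic double scan over all (a,b) with a*a<A and b*b<A by a single two-pointer sweep: b starts at the largest value with b*b<A and a climbs while b falls.
import Mathlib
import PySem

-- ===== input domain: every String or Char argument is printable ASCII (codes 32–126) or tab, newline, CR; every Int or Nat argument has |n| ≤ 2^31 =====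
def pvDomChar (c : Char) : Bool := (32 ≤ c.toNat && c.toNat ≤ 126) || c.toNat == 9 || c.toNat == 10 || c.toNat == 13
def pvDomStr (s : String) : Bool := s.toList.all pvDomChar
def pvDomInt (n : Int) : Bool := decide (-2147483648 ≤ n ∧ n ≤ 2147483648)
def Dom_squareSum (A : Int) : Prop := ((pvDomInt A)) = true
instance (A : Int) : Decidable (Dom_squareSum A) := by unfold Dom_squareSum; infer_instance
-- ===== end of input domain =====

-- B replaces A's quadratic double scan (all a,b with a*a<A, b*b<A) by a two-pointer sweep
-- over the same strict bounds; equivalence of the return values is proved for every Int A.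
-- ===== PORT A =====
-- fuel A.toNat+1 is an upper bound on the iterations of each Python while loop (the counter
-- passes its bound within that many steps); with it the loops are structural recursions.
def pvFuel (A : Int) : Nat := A.toNat + 1

def bLoopA (A a : Int) : Nat → Int → List (List Int)
  | 0, _ => []
  | f+1, b =>
    if b * b < A then
      (if a * a + b * b = A ∧ a ≤ b then [[a, b]] else []) ++ bLoopA A a f (b + 1)
    else []

def aLoopA (A : Int) : Nat → Int → List (List Int)
  | 0, _ => []
  | f+1, a =>
    if a * a < A then bLoopA A a (pvFuel A) 0 ++ aLoopA A f (a + 1) else []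

def squareSum (A : Int) : List (List Int) := aLoopA A (pvFuel A) 0

-- ===== PORT B =====
-- first Python while loop of B: climb b to the smallest b ≥ 0 with b*b ≥ A
def initLoopB (A : Int) : Nat → Int → Int
  | 0, b => b
  | f+1, b => if b * b < A then initLoopB A f (b + 1) else b

-- second Python while loop of B: the two-pointer sweep
def sweepB (A : Int) : Nat → Int → Int → List (List Int)
  | 0, _, _ => []
  | f+1, a, b =>
    if a ≤ b then
      if a * a + b * b = A then [a, b] :: sweepB A f (a + 1) (b - 1)
      else if a * a + b * b < A then sweepB A f (a + 1) b
      else sweepB A f a (b - 1)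
    else []

-- the `- 1` is Python B's `b -= 1`: b starts at the largest value with b*b < A
def squareSum_alt (A : Int) : List (List Int) :=
  sweepB A (pvFuel A) 0 (initLoopB A (pvFuel A) 0 - 1)

-- ===== PRECONDITION & SPEC =====
def Spec_squareSum (A : Int) (out : List (List Int)) : Prop := out = squareSum_alt A
instance (A : Int) (out : List (List Int)) : Decidable (Spec_squareSum A out) := by unfold Spec_squareSum; infer_instance

-- ===== CLAIM (what is proved, stated in full; the proofs are below) =====
def Claim_equal_squareSum : Prop := ∀ (A : Int), Dom_squareSum A → Spec_squareSum A (squareSum A)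

-- ===== LEMMAS AND PROOFS =====
lemma sq_le_sq_int {x y : Int} (hx : 0 ≤ x) (hxy : x ≤ y) : x * x ≤ y * y := by nlinarith
lemma sq_lt_sq_int {x y : Int} (hx : 0 ≤ x) (hxy : x < y) : x * x < y * y := by nlinarith
lemma le_sq_of_le {A b : Int} (_hb : 0 ≤ b) (h : A ≤ b) : A ≤ b * b := by
  nlinarith [mul_self_nonneg b, mul_self_nonneg (b - 1)]
lemma lt_of_sq_lt {A b : Int} (hb : 0 ≤ b) (h : b * b < A) : b < A := by
  by_contra hc
  have h2 : A ≤ b := by omega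
  have h3 := le_sq_of_le hb h2
  omega

lemma bLoopA_mem (A a : Int) (f : Nat) : ∀ (b : Int), 0 ≤ b → (A - b).toNat ≤ f →
    ∀ l, l ∈ bLoopA A a f b ↔ ∃ y, l = [a, y] ∧ b ≤ y ∧ y * y < A ∧ a * a + y * y = A ∧ a ≤ y := by
  induction f with
  | zero =>
    intro b hb hf l
    simp only [bLoopA, List.not_mem_nil, false_iff]
    rintro ⟨y, rfl, hby, hyA, _, _⟩
    exact absurd (le_sq_of_le (by omega) (by omega) : A ≤ y * y) (by omega)
  | succ f ih =>
    intro b hb hf l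
    by_cases hg : b * b < A
    · have hbA : b < A := lt_of_sq_lt hb hg
      simp only [bLoopA, if_pos hg, List.mem_append]
      rw [ih (b + 1) (by omega) (by omega) l]
      by_cases he : a * a + b * b = A ∧ a ≤ b
      · simp only [if_pos he, List.mem_singleton]
        constructor
        · rintro (rfl | ⟨y, rfl, h1, h2, h3, h4⟩)
          · exact ⟨b, rfl, le_refl b, hg, he.1, he.2⟩
          · exact ⟨y, rfl, by omega, h2, h3, h4⟩
        · rintro ⟨y, rfl, hby, h2, h3, h4⟩
          rcases eq_or_lt_of_le hby with rfl | hlt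
          · left; rfl
          · right; exact ⟨y, rfl, by omega, h2, h3, h4⟩
      · simp only [if_neg he, List.not_mem_nil, false_or]
        constructor
        · rintro ⟨y, rfl, h1, h2, h3, h4⟩; exact ⟨y, rfl, by omega, h2, h3, h4⟩
        · rintro ⟨y, rfl, hby, h2, h3, h4⟩
          rcases eq_or_lt_of_le hby with rfl | hlt
          · exact absurd ⟨h3, h4⟩ he
          · exact ⟨y, rfl, by omega, h2, h3, h4⟩
    · simp only [bLoopA, if_neg hg, List.not_mem_nil, false_iff]
      rintro ⟨y, rfl, hby, hyA, _, _⟩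
      exact absurd (sq_le_sq_int hb hby) (by omega)

lemma aLoopA_mem (A : Int) (f : Nat) : ∀ (a : Int), 0 ≤ a → (A - a).toNat ≤ f →
    ∀ l, l ∈ aLoopA A f a ↔ ∃ x y, l = [x, y] ∧ a ≤ x ∧ 0 ≤ y ∧ x ≤ y ∧
      x * x + y * y = A ∧ x * x < A ∧ y * y < A := by
  induction f with
  | zero =>
    intro a ha hf l
    simp only [aLoopA, List.not_mem_nil, false_iff]
    rintro ⟨x, y, rfl, hax, hy, hxy, hsum, hxA, hyA⟩
    exact absurd (le_sq_of_le (by omega) (by omega) : A ≤ x * x) (by omega)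
  | succ f ih =>
    intro a ha hf l
    by_cases hg : a * a < A
    · have haA : a < A := lt_of_sq_lt ha hg
      simp only [aLoopA, if_pos hg, List.mem_append]
      rw [bLoopA_mem A a (pvFuel A) 0 le_rfl (by unfold pvFuel; omega) l,
          ih (a + 1) (by omega) (by omega) l]
      constructor
      · rintro (⟨y, rfl, h0y, hyA, hsum, hay⟩ | ⟨x, y, rfl, hax, hy, hxy, hsum, hxA, hyA⟩)
        · exact ⟨a, y, rfl, le_rfl, h0y, hay, hsum, hg, hyA⟩
        · exact ⟨x, y, rfl, by omega, hy, hxy, hsum, hxA, hyA⟩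
      · rintro ⟨x, y, rfl, hax, hy, hxy, hsum, hxA, hyA⟩
        rcases eq_or_lt_of_le hax with rfl | h
        · left; exact ⟨y, rfl, hy, hyA, hsum, hxy⟩
        · right; exact ⟨x, y, rfl, by omega, hy, hxy, hsum, hxA, hyA⟩
    · simp only [aLoopA, if_neg hg, List.not_mem_nil, false_iff]
      rintro ⟨x, y, rfl, hax, hy, hxy, hsum, hxA, hyA⟩
      exact absurd (sq_le_sq_int ha hax) (by omega)

lemma squareSum_mem (A : Int) (l : List Int) :
    l ∈ squareSum A ↔ ∃ x y, l = [x, y] ∧ 0 ≤ x ∧ 0 ≤ y ∧ x ≤ y ∧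
      x * x + y * y = A ∧ x * x < A ∧ y * y < A := by
  unfold squareSum
  exact aLoopA_mem A (pvFuel A) 0 le_rfl (by unfold pvFuel; omega) l

lemma initLoopB_spec (A : Int) (f : Nat) : ∀ (b : Int), 0 ≤ b → (A - b).toNat ≤ f →
    b ≤ initLoopB A f b ∧ A ≤ initLoopB A f b * initLoopB A f b ∧
      ∀ y, b ≤ y → y < initLoopB A f b → y * y < A := by
  induction f with
  | zero =>
    intro b hb hf
    simp only [initLoopB]
    exact ⟨le_rfl, le_sq_of_le hb (by omega), fun y h1 h2 => by omega⟩
  | succ f ih =>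
    intro b hb hf
    by_cases hg : b * b < A
    · have hbA : b < A := lt_of_sq_lt hb hg
      simp only [initLoopB, if_pos hg]
      obtain ⟨h1, h2, h3⟩ := ih (b + 1) (by omega) (by omega)
      refine ⟨by omega, h2, fun y hy1 hy2 => ?_⟩
      rcases eq_or_lt_of_le hy1 with rfl | h
      · exact hg
      · exact h3 y (by omega) hy2
    · simp only [initLoopB, if_neg hg]
      exact ⟨le_rfl, by omega, fun y h1 h2 => absurd h2 (by omega)⟩

lemma initB_top (A : Int) : 0 ≤ initLoopB A (pvFuel A) 0 ∧ initLoopB A (pvFuel A) 0 ≤ A.toNat ∧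
    A ≤ initLoopB A (pvFuel A) 0 * initLoopB A (pvFuel A) 0 ∧
    ∀ y, 0 ≤ y → y < initLoopB A (pvFuel A) 0 → y * y < A := by
  obtain ⟨h1, h2, h3⟩ := initLoopB_spec A (pvFuel A) 0 le_rfl (by unfold pvFuel; omega)
  refine ⟨h1, ?_, h2, h3⟩
  rcases eq_or_lt_of_le h1 with h | h
  · omega
  · have hy := h3 (initLoopB A (pvFuel A) 0 - 1) (by omega) (by omega)
    have hlt := lt_of_sq_lt (b := initLoopB A (pvFuel A) 0 - 1) (by omega) hy
    omega

lemma sweep_fuel (A : Int) : (initLoopB A (pvFuel A) 0 - 1 - 0 + 1).toNat ≤ pvFuel A := by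
  obtain ⟨hr0, hrA, -, -⟩ := initB_top A
  unfold pvFuel at hrA ⊢
  omega

lemma sweepB_mem (A : Int) (f : Nat) : ∀ (a b : Int), 0 ≤ a → (b - a + 1).toNat ≤ f →
    ∀ l, l ∈ sweepB A f a b ↔ ∃ x y, l = [x, y] ∧ a ≤ x ∧ x ≤ y ∧ y ≤ b ∧ x * x + y * y = A := by
  induction f with
  | zero =>
    intro a b ha hf l
    simp only [sweepB, List.not_mem_nil, false_iff]
    rintro ⟨x, y, rfl, h1, h2, h3, h4⟩; omega
  | succ f ih =>
    intro a b ha hf l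
    by_cases hab : a ≤ b
    · by_cases heq : a * a + b * b = A
      · simp only [sweepB, if_pos hab, if_pos heq, List.mem_cons]
        rw [ih (a + 1) (b - 1) (by omega) (by omega) l]
        constructor
        · rintro (rfl | ⟨x, y, rfl, h1, h2, h3, h4⟩)
          · exact ⟨a, b, rfl, le_rfl, hab, le_rfl, heq⟩
          · exact ⟨x, y, rfl, by omega, h2, by omega, h4⟩
        · rintro ⟨x, y, rfl, h1, h2, h3, h4⟩
          rcases eq_or_lt_of_le h1 with rfl | hax
          · rcases eq_or_lt_of_le h3 with rfl | hyb
            · left; rfl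
            · exact absurd (sq_lt_sq_int (by omega) hyb) (by omega)
          · right
            have hxx : a * a < x * x := sq_lt_sq_int ha hax
            have hyb : y < b := by
              by_contra hc
              exact absurd (sq_le_sq_int (by omega) (by omega : b ≤ y)) (by omega)
            exact ⟨x, y, rfl, by omega, h2, by omega, h4⟩
      · by_cases hlt : a * a + b * b < A
        · simp only [sweepB, if_pos hab, if_neg heq, if_pos hlt]
          rw [ih (a + 1) b (by omega) (by omega) l]
          constructor
          · rintro ⟨x, y, rfl, h1, h2, h3, h4⟩
            exact ⟨x, y, rfl, by omega, h2, h3, h4⟩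
          · rintro ⟨x, y, rfl, h1, h2, h3, h4⟩
            rcases eq_or_lt_of_le h1 with rfl | hax
            · exact absurd (sq_le_sq_int (by omega) h3 : y * y ≤ b * b) (by omega)
            · exact ⟨x, y, rfl, by omega, h2, h3, h4⟩
        · simp only [sweepB, if_pos hab, if_neg heq, if_neg hlt]
          rw [ih a (b - 1) ha (by omega) l]
          constructor
          · rintro ⟨x, y, rfl, h1, h2, h3, h4⟩
            exact ⟨x, y, rfl, h1, h2, by omega, h4⟩
          · rintro ⟨x, y, rfl, h1, h2, h3, h4⟩
            rcases eq_or_lt_of_le h3 with rfl | hyb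
            · exact absurd (sq_le_sq_int ha h1 : a * a ≤ x * x) (by omega)
            · exact ⟨x, y, rfl, h1, h2, by omega, h4⟩
    · simp only [sweepB, if_neg hab, List.not_mem_nil, false_iff]
      rintro ⟨x, y, rfl, h1, h2, h3, h4⟩; omega

lemma squareSum_alt_mem (A : Int) (l : List Int) :
    l ∈ squareSum_alt A ↔ ∃ x y, l = [x, y] ∧ 0 ≤ x ∧ 0 ≤ y ∧ x ≤ y ∧
      x * x + y * y = A ∧ x * x < A ∧ y * y < A := by
  unfold squareSum_alt
  obtain ⟨hr0, hrA, hrsq, hmin⟩ := initB_top A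
  rw [sweepB_mem A (pvFuel A) 0 (initLoopB A (pvFuel A) 0 - 1) le_rfl (sweep_fuel A) l]
  constructor
  · rintro ⟨x, y, rfl, hx, hxy, hyr, hsum⟩
    have hy : 0 ≤ y := le_trans hx hxy
    have hyA : y * y < A := hmin y hy (by omega)
    exact ⟨x, y, rfl, hx, hy, hxy, hsum, by
      have := sq_le_sq_int hx hxy; omega, hyA⟩
  · rintro ⟨x, y, rfl, hx, hy, hxy, hsum, hxA, hyA⟩
    have hyr : y ≤ initLoopB A (pvFuel A) 0 - 1 := by
      by_contra hc
      have h1 : initLoopB A (pvFuel A) 0 ≤ y := by omega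
      have h2 := sq_le_sq_int hr0 h1
      omega
    exact ⟨x, y, rfl, hx, hxy, hyr, hsum⟩

lemma bLoopA_single (A a : Int) (f : Nat) : ∀ (b : Int), 0 ≤ b → (A - b).toNat ≤ f →
    bLoopA A a f b = [] ∨ ∃ y, bLoopA A a f b = [[a, y]] := by
  induction f with
  | zero => intro b hb hf; left; rfl
  | succ f ih =>
    intro b hb hf
    by_cases hg : b * b < A
    · have hbA : b < A := lt_of_sq_lt hb hg
      by_cases he : a * a + b * b = A ∧ a ≤ b
      · right
        refine ⟨b, ?_⟩
        simp only [bLoopA, if_pos hg, if_pos he, List.singleton_append, List.cons.injEq, true_and]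
        rw [List.eq_nil_iff_forall_not_mem]
        intro l hl
        obtain ⟨y, rfl, hby, hyA, hsum, hay⟩ :=
          (bLoopA_mem A a f (b + 1) (by omega) (by omega) l).mp hl
        exact absurd (sq_lt_sq_int hb (by omega : b < y)) (by omega)
      · have : bLoopA A a (f + 1) b = bLoopA A a f (b + 1) := by
          simp only [bLoopA, if_pos hg, if_neg he, List.nil_append]
        rw [this]
        exact ih (b + 1) (by omega) (by omega)
    · left; simp only [bLoopA, if_neg hg]

lemma aLoopA_sorted (A : Int) (f : Nat) : ∀ (a : Int), 0 ≤ a → (A - a).toNat ≤ f →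
    (aLoopA A f a).Pairwise (fun u v => u.head! < v.head!) := by
  induction f with
  | zero => intro a ha hf; simp only [aLoopA]; exact List.Pairwise.nil
  | succ f ih =>
    intro a ha hf
    by_cases hg : a * a < A
    · have haA : a < A := lt_of_sq_lt ha hg
      simp only [aLoopA, if_pos hg]
      rw [List.pairwise_append]
      refine ⟨?_, ih (a + 1) (by omega) (by omega), ?_⟩
      · rcases bLoopA_single A a (pvFuel A) 0 le_rfl (by unfold pvFuel; omega) with h | ⟨y, h⟩
        · rw [h]; exact List.Pairwise.nil
        · rw [h]; exact List.pairwise_singleton _ _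
      · intro u hu v hv
        obtain ⟨y, rfl, -, -, -, -⟩ :=
          (bLoopA_mem A a (pvFuel A) 0 le_rfl (by unfold pvFuel; omega) u).mp hu
        obtain ⟨x, y', rfl, hax, -, -, -, -, -⟩ :=
          (aLoopA_mem A f (a + 1) (by omega) (by omega) v).mp hv
        simpa using by omega
    · simp only [aLoopA, if_neg hg]; exact List.Pairwise.nil

lemma sweepB_sorted (A : Int) (f : Nat) : ∀ (a b : Int), 0 ≤ a → (b - a + 1).toNat ≤ f →
    (sweepB A f a b).Pairwise (fun u v => u.head! < v.head!) := by
  induction f with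
  | zero => intro a b ha hf; exact List.Pairwise.nil
  | succ f ih =>
    intro a b ha hf
    by_cases hab : a ≤ b
    · by_cases heq : a * a + b * b = A
      · simp only [sweepB, if_pos hab, if_pos heq]
        refine List.Pairwise.cons ?_ (ih (a + 1) (b - 1) (by omega) (by omega))
        intro v hv
        obtain ⟨x, y, rfl, hax, -, -, -⟩ :=
          (sweepB_mem A f (a + 1) (b - 1) (by omega) (by omega) v).mp hv
        simpa using by omega
      · by_cases hlt : a * a + b * b < A
        · simp only [sweepB, if_pos hab, if_neg heq, if_pos hlt]
          exact ih (a + 1) b (by omega) (by omega)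
        · simp only [sweepB, if_pos hab, if_neg heq, if_neg hlt]
          exact ih a (b - 1) ha (by omega)
    · simp only [sweepB, if_neg hab]; exact List.Pairwise.nil

lemma squareSum_sorted (A : Int) : (squareSum A).Pairwise (fun u v => u.head! < v.head!) :=
  aLoopA_sorted A (pvFuel A) 0 le_rfl (by unfold pvFuel; omega)

lemma squareSum_alt_sorted (A : Int) : (squareSum_alt A).Pairwise (fun u v => u.head! < v.head!) := by
  unfold squareSum_alt
  exact sweepB_sorted A (pvFuel A) 0 _ le_rfl (sweep_fuel A)

lemma eq_of_mem_sorted (l1 l2 : List (List Int))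
    (h1 : l1.Pairwise (fun u v => u.head! < v.head!))
    (h2 : l2.Pairwise (fun u v => u.head! < v.head!))
    (hm : ∀ l, l ∈ l1 ↔ l ∈ l2) : l1 = l2 := by
  have n1 : l1.Nodup := h1.imp (fun h => by rintro rfl; exact lt_irrefl _ h)
  have n2 : l2.Nodup := h2.imp (fun h => by rintro rfl; exact lt_irrefl _ h)
  have hp : l1.Perm l2 := (List.perm_ext_iff_of_nodup n1 n2).mpr hm
  exact hp.eq_of_pairwise (fun a b _ _ hab hba => absurd hba (lt_asymm hab)) h1 h2

-- ===== VERDICT (by name: the statement is the Claim_ definition above) =====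
theorem squareSum_spec : Claim_equal_squareSum := by
  intro A _
  apply eq_of_mem_sorted _ _ (squareSum_sorted A) (squareSum_alt_sorted A)
  intro l
  rw [squareSum_mem, squareSum_alt_mem]
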